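-- pv_equiv track=rewrite | github.com/KERBOUTE/40Dayscodechallenge | Day002/longest substring.py | lengthOfLongestSubstringFistmethod
-- ===== SOURCE A (Python) =====
-- def lengthOfLongestSubstringFistmethod(s):
--   list = sorted([(i,j) for i,j in enumerate(s)], key=lambda tup: tup[1])
--   list =sorted([list[i] for i in range(len(list)-1) if list[i][1]==list[i+1][1] and list[i][0]==list[i+1][0]-1], key=lambda tup: tup[0])
--   x=0
--   for i in range(len(list)-1):
--       if list[i+1][0]-list[i][0]>x:
--           x=list[i+1][0]-list[i][0]
--   return x
-- ===== SOURCE B (Python) =====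
-- def lengthOfLongestSubstringFistmethod(s):
--     # One linear scan: positions p with s[p]==s[p+1] appear in increasing order,
--     # so track the previous such position and the maximum gap on the fly.
--     x = 0
--     prev = None
--     for p in range(len(s) - 1):
--         if s[p] == s[p + 1]:
--             if prev is not None and p - prev > x:
--                 x = p - prev
--             prev = p
--     return x
-- ===== Notes on version B (the rewrite author's own statement) =====
-- stated objective: faster
-- what changed: A sorts the enumerated characters by char, filters adjacent equal-char consecutive-index pairs, re-sorts them by index and scans gaps; B does a single linear pass over the string tracking the previous position p with s[p]==s[p+1] and the running maximum gap.
import Mathlib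
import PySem

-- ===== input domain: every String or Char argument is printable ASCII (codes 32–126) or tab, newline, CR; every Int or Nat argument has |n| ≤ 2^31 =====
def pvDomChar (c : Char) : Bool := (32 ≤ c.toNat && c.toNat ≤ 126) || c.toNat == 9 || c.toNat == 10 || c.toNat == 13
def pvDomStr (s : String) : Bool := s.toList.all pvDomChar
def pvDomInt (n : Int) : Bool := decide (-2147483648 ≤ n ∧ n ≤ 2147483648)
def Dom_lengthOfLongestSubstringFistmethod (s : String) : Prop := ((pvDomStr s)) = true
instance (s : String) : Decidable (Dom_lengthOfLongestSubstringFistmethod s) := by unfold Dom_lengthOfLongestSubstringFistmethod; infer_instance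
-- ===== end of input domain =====

-- B replaces A's two sorts (sort pairs by char, keep adjacent equal-char consecutive-index pairs,
-- re-sort by index, then scan gaps) by one linear scan tracking the previous doubled position.

-- ===== PORT A =====
def lengthOfLongestSubstringFistmethod (s : String) : Int :=
  let l1 := PySem.List.sorted (PySem.List.enumerate s.toList 0) (fun tup => tup.2) false
  let l2 := PySem.List.sorted
    (((PySem.List.pyRange 0 (PySem.List.len l1 - 1) 1).filter (fun i =>
        (PySem.List.pyGetD l1 i (0, ' ')).2 == (PySem.List.pyGetD l1 (i + 1) (0, ' ')).2 &&
        (PySem.List.pyGetD l1 i (0, ' ')).1 == (PySem.List.pyGetD l1 (i + 1) (0, ' ')).1 - 1)).map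
      (fun i => PySem.List.pyGetD l1 i (0, ' ')))
    (fun tup => tup.1) false
  (PySem.List.pyRange 0 (PySem.List.len l2 - 1) 1).foldl (fun x i =>
    if (PySem.List.pyGetD l2 (i + 1) (0, ' ')).1 - (PySem.List.pyGetD l2 i (0, ' ')).1 > x then
      (PySem.List.pyGetD l2 (i + 1) (0, ' ')).1 - (PySem.List.pyGetD l2 i (0, ' ')).1
    else x) 0

-- ===== PORT B =====
-- s[p] on an in-range index p is exact as pyGetD of s.toList
def lengthOfLongestSubstringFistmethod_alt (s : String) : Int :=
  ((PySem.List.pyRange 0 (PySem.Str.len s - 1) 1).foldl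
    (fun (st : Int × Option Int) p =>
      if PySem.List.pyGetD s.toList p ' ' = PySem.List.pyGetD s.toList (p + 1) ' ' then
        ((match st.2 with
          | some prev => if p - prev > st.1 then p - prev else st.1
          | none => st.1), some p)
      else st) ((0 : Int), (none : Option Int))).1

-- ===== PRECONDITION & SPEC =====
def Spec_lengthOfLongestSubstringFistmethod (s : String) (out : Int) : Prop := out = lengthOfLongestSubstringFistmethod_alt s
instance (s : String) (out : Int) : Decidable (Spec_lengthOfLongestSubstringFistmethod s out) := by unfold Spec_lengthOfLongestSubstringFistmethod; infer_instance

-- ===== CLAIM (what is proved, stated in full; the proofs are below) =====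
def Claim_equal_lengthOfLongestSubstringFistmethod : Prop := ∀ (s : String), Dom_lengthOfLongestSubstringFistmethod s → Spec_lengthOfLongestSubstringFistmethod s (lengthOfLongestSubstringFistmethod s)

-- ===== LEMMAS AND PROOFS =====

-- strict "char, then index" order: what A's stable char-sort produces on the enumerate pairs
def LexLt (a b : Int × Char) : Prop := a.2 < b.2 ∨ (a.2 = b.2 ∧ a.1 < b.1)

-- A's intermediate lists, named for the proofs
def l1F (cs : List Char) : List (Int × Char) :=
  PySem.List.sorted (PySem.List.enumerate cs 0) (fun tup => tup.2) false

def FF (cs : List Char) : List (Int × Char) :=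
  ((PySem.List.pyRange 0 (PySem.List.len (l1F cs) - 1) 1).filter (fun i =>
      (PySem.List.pyGetD (l1F cs) i (0, ' ')).2 == (PySem.List.pyGetD (l1F cs) (i + 1) (0, ' ')).2 &&
      (PySem.List.pyGetD (l1F cs) i (0, ' ')).1 == (PySem.List.pyGetD (l1F cs) (i + 1) (0, ' ')).1 - 1)).map
    (fun i => PySem.List.pyGetD (l1F cs) i (0, ' '))

def l2F (cs : List Char) : List (Int × Char) :=
  PySem.List.sorted (FF cs) (fun tup => tup.1) false

-- positions p with cs[p] == cs[p+1], in increasing order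
def dbl (cs : List Char) : List Nat :=
  (List.range (cs.length - 1)).filter (fun p => cs.getD p ' ' == cs.getD (p + 1) ' ')

-- those positions paired with their char: what A's second sort yields
def pmList (cs : List Char) : List (Int × Char) :=
  (dbl cs).map (fun p : Nat => ((p : Int), cs.getD p ' '))

def gaps (l : List Int) : List Int := (l.zip l.tail).map (fun ab => ab.2 - ab.1)

def mg (l : List Int) : Int := (gaps l).foldl (fun x g => if g > x then g else x) 0

lemma portA_eq (s : String) : lengthOfLongestSubstringFistmethod s =
    (PySem.List.pyRange 0 (PySem.List.len (l2F s.toList) - 1) 1).foldl (fun x i =>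
      if (PySem.List.pyGetD (l2F s.toList) (i + 1) (0, ' ')).1 - (PySem.List.pyGetD (l2F s.toList) i (0, ' ')).1 > x then
        (PySem.List.pyGetD (l2F s.toList) (i + 1) (0, ' ')).1 - (PySem.List.pyGetD (l2F s.toList) i (0, ' ')).1
      else x) 0 := rfl

lemma insertBy_lex (x : Int × Char) (acc : List (Int × Char))
    (h1 : acc.Pairwise LexLt) (h2 : ∀ y ∈ acc, y.1 < x.1) :
    (PySem.List.insertBy (fun a b => decide (a.2 < b.2)) x acc).Pairwise LexLt := by
  induction acc with
  | nil => simp [PySem.List.insertBy]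
  | cons y ys ih =>
    rw [List.pairwise_cons] at h1
    obtain ⟨hy, hys⟩ := h1
    simp only [PySem.List.insertBy]
    by_cases hlt : x.2 < y.2
    · simp only [hlt, decide_true, if_true]
      refine List.Pairwise.cons ?_ (List.Pairwise.cons hy hys)
      intro z hz
      rcases List.mem_cons.mp hz with rfl | hz
      · exact Or.inl hlt
      · rcases hy z hz with h | ⟨he, _⟩
        · exact Or.inl (lt_trans hlt h)
        · exact Or.inl (he ▸ hlt)
    · simp only [hlt, decide_false]
      refine List.Pairwise.cons ?_ (ih hys (fun z hz => h2 z (List.mem_cons_of_mem _ hz)))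
      intro z hz
      rcases (PySem.List.mem_insertBy _ _ _ _).mp hz with rfl | hz
      · rcases lt_or_eq_of_le (not_lt.mp hlt) with h | h
        · exact Or.inl h
        · exact Or.inr ⟨h, h2 y (List.mem_cons_self ..)⟩
      · exact hy z hz

lemma foldl_insertBy_lex (xs : List (Int × Char)) (acc : List (Int × Char))
    (hacc : acc.Pairwise LexLt) (hx : ∀ y ∈ acc, ∀ x ∈ xs, y.1 < x.1)
    (hxs : xs.Pairwise (fun a b => a.1 < b.1)) :
    (xs.foldl (fun acc x => PySem.List.insertBy (fun a b => decide (a.2 < b.2)) x acc) acc).Pairwise LexLt := by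
  induction xs generalizing acc with
  | nil => simpa using hacc
  | cons x xs ih =>
    rw [List.pairwise_cons] at hxs
    obtain ⟨hx1, hxs⟩ := hxs
    simp only [List.foldl_cons]
    refine ih _ (insertBy_lex x acc hacc (fun y hy => hx y hy x (List.mem_cons_self ..))) ?_ hxs
    intro y hy z hz
    rcases (PySem.List.mem_insertBy _ _ _ _).mp hy with rfl | hy
    · exact hx1 z hz
    · exact hx y hy z (List.mem_cons_of_mem _ hz)

lemma enum_nodup (cs : List Char) : (PySem.List.enumerate cs 0).Nodup :=
  (PySem.List.pairwise_lt_enumerate cs 0).imp (fun h he => absurd (he ▸ h) (lt_irrefl _))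

lemma l1F_lex (cs : List Char) : (l1F cs).Pairwise LexLt := by
  unfold l1F
  rw [PySem.List.sorted_eq_foldl_insertBy]
  exact foldl_insertBy_lex _ [] (by simp) (by simp) (PySem.List.pairwise_lt_enumerate cs 0)

lemma l1F_mem (cs : List Char) (x : Int × Char) :
    x ∈ l1F cs ↔ ∃ k : Nat, ∃ h : k < cs.length, x = ((k : Int), cs[k]) := by
  unfold l1F
  simp [PySem.List.mem_sorted, PySem.List.mem_enumerate_iff]

lemma l1F_length (cs : List Char) : (l1F cs).length = cs.length := by
  unfold l1F
  rw [PySem.List.length_sorted, PySem.List.length_enumerate]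

lemma l1F_nodup (cs : List Char) : (l1F cs).Nodup :=
  ((PySem.List.sorted_perm _ _ _).nodup_iff).mpr (enum_nodup cs)

-- a doubled position k yields two adjacent entries (k,c),(k+1,c) of the char-sorted list
lemma l1F_adjacent (cs : List Char) (k : Nat) (hk : k + 1 < cs.length)
    (heq : cs[k] = cs[k + 1]) :
    ∃ i : Nat, ∃ hi : i + 1 < (l1F cs).length,
      (l1F cs)[i]'(by omega) = ((k : Int), cs[k]'(by omega)) ∧
      (l1F cs)[i + 1]'hi = ((k : Int) + 1, cs[k]'(by omega)) := by
  have hlen := l1F_length cs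
  have hlex := l1F_lex cs
  have hpw := List.pairwise_iff_getElem.mp hlex
  have hmem1 : ((k : Int), cs[k]'(by omega)) ∈ l1F cs :=
    (l1F_mem cs _).mpr ⟨k, by omega, rfl⟩
  have hmem2 : ((k : Int) + 1, cs[k]'(by omega)) ∈ l1F cs := by
    refine (l1F_mem cs _).mpr ⟨k + 1, hk, ?_⟩
    rw [heq]; push_cast; ring_nf
  obtain ⟨i, hi, hIi⟩ := List.mem_iff_getElem.mp hmem1
  obtain ⟨j, hj, hIj⟩ := List.mem_iff_getElem.mp hmem2
  have hij : i < j := by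
    rcases lt_trichotomy i j with h | h | h
    · exact h
    · exfalso; subst h
      rw [hIi] at hIj
      have : (k : Int) = (k : Int) + 1 := congrArg Prod.fst hIj
      omega
    · exfalso
      have hlt2 := hpw j i hj hi h
      rw [hIi, hIj] at hlt2
      rcases hlt2 with h' | ⟨_, h'⟩
      · exact lt_irrefl _ h'
      · omega
  have hj1 : j = i + 1 := by
    by_contra hne
    have h1j : i + 1 < j := by omega
    have hy1 := hpw i (i + 1) hi (by omega) (by omega)
    have hy2 := hpw (i + 1) j (by omega) hj h1j
    have hymem : (l1F cs)[i + 1]'(by omega) ∈ l1F cs := List.getElem_mem _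
    obtain ⟨m, hm, hym⟩ := (l1F_mem cs _).mp hymem
    rw [hIi, hym] at hy1
    rw [hym, hIj] at hy2
    rcases hy1 with h1 | ⟨h1, h1'⟩ <;> rcases hy2 with h2 | ⟨h2, h2'⟩
    · exact lt_asymm h1 h2
    · rw [h2] at h1; exact lt_irrefl _ h1
    · rw [h1] at h2; exact lt_irrefl _ h2
    · omega
  subst hj1
  exact ⟨i, by omega, hIi, hIj⟩

-- membership in A's filtered list
lemma FF_mem (cs : List Char) (x : Int × Char) :
    x ∈ FF cs ↔ ∃ k : Nat, k + 1 < cs.length ∧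
      cs.getD k ' ' = cs.getD (k + 1) ' ' ∧ x = ((k : Int), cs.getD k ' ') := by
  unfold FF
  simp only [PySem.List.len_eq, l1F_length, List.mem_map, List.mem_filter,
    PySem.List.mem_pyRange_one, Bool.and_eq_true, beq_iff_eq]
  constructor
  · rintro ⟨i, ⟨⟨h0, h1⟩, hc1, hc2⟩, rfl⟩
    have hil : i.toNat + 1 < (l1F cs).length := by rw [l1F_length]; omega
    have e1 : PySem.List.pyGetD (l1F cs) i (0, ' ') = (l1F cs)[i.toNat]'(by omega) :=
      PySem.List.pyGetD_eq_getElem _ _ h0 (by rw [l1F_length]; omega)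
    have e2 : PySem.List.pyGetD (l1F cs) (i + 1) (0, ' ') = (l1F cs)[i.toNat + 1]'hil := by
      rw [PySem.List.pyGetD_eq_getElem _ _ (by omega) (by rw [l1F_length]; omega)]
      congr 1
      omega
    rw [e1, e2] at hc1 hc2
    obtain ⟨m, hm, hym⟩ := (l1F_mem cs ((l1F cs)[i.toNat]'(by omega))).mp (List.getElem_mem (by omega))
    obtain ⟨m', hm', hym'⟩ := (l1F_mem cs ((l1F cs)[i.toNat + 1]'hil)).mp (List.getElem_mem hil)
    rw [hym, hym'] at hc1 hc2
    simp only at hc1 hc2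
    have hmm : m' = m + 1 := by omega
    subst hmm
    refine ⟨m, by omega, ?_, ?_⟩
    · rw [List.getD_eq_getElem _ _ (by omega), List.getD_eq_getElem _ _ (by omega)]
      exact hc1
    · rw [e1, hym, List.getD_eq_getElem _ _ (by omega)]
  · rintro ⟨k, hk, heq, rfl⟩
    have heq' : cs[k]'(by omega) = cs[k + 1]'hk := by
      rw [← List.getD_eq_getElem _ ' ' (show k < cs.length by omega),
          ← List.getD_eq_getElem _ ' ' hk]
      exact heq
    obtain ⟨i, hi, hIi, hIi1⟩ := l1F_adjacent cs k hk heq'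
    have g1 : PySem.List.pyGetD (l1F cs) (i : Int) (0, ' ') = (l1F cs)[i]'(by omega) := by
      rw [PySem.List.pyGetD_natCast, List.getD_eq_getElem _ _ (by omega)]
    have g2 : PySem.List.pyGetD (l1F cs) ((i : Int) + 1) (0, ' ') = (l1F cs)[i + 1]'hi := by
      rw [show ((i : Int) + 1) = ((i + 1 : Nat) : Int) by push_cast; ring,
          PySem.List.pyGetD_natCast, List.getD_eq_getElem _ _ hi]
    refine ⟨(i : Int), ⟨⟨by positivity, by rw [l1F_length] at hi; omega⟩, ?_, ?_⟩, ?_⟩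
    · rw [g1, g2, hIi, hIi1]
    · rw [g1, g2, hIi, hIi1]
      simp
    · rw [g1, hIi, List.getD_eq_getElem _ _ (by omega)]

lemma FF_nodup (cs : List Char) : (FF cs).Nodup := by
  unfold FF
  refine List.Nodup.map_on ?_ (List.Nodup.filter _ (PySem.List.nodup_pyRange_one _ _))
  intro i hi j hj he
  rw [List.mem_filter] at hi hj
  have hi' := PySem.List.mem_pyRange_one.mp hi.1
  have hj' := PySem.List.mem_pyRange_one.mp hj.1
  rw [PySem.List.len_eq, l1F_length] at hi' hj'
  rw [PySem.List.pyGetD_eq_getElem _ _ hi'.1 (by rw [l1F_length]; omega),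
      PySem.List.pyGetD_eq_getElem _ _ hj'.1 (by rw [l1F_length]; omega)] at he
  have := ((l1F_nodup cs).getElem_inj_iff).mp he
  omega

lemma pmList_mem (cs : List Char) (x : Int × Char) :
    x ∈ pmList cs ↔ ∃ k : Nat, k + 1 < cs.length ∧
      cs.getD k ' ' = cs.getD (k + 1) ' ' ∧ x = ((k : Int), cs.getD k ' ') := by
  unfold pmList dbl
  simp only [List.mem_map, List.mem_filter, List.mem_range, beq_iff_eq]
  constructor
  · rintro ⟨p, ⟨hp, hc⟩, rfl⟩
    exact ⟨p, by omega, hc, rfl⟩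
  · rintro ⟨k, hk, hc, rfl⟩
    exact ⟨k, ⟨by omega, hc⟩, rfl⟩

lemma pmList_pairwise (cs : List Char) : (pmList cs).Pairwise (fun a b => a.1 < b.1) := by
  unfold pmList dbl
  refine List.Pairwise.map _ (fun a b h => ?_) (List.Pairwise.filter _ List.pairwise_lt_range)
  simp only
  exact_mod_cast h

lemma pmList_nodup (cs : List Char) : (pmList cs).Nodup :=
  (pmList_pairwise cs).imp (fun h he => absurd (he ▸ h) (lt_irrefl _))

lemma l2F_eq (cs : List Char) : l2F cs = pmList cs := by
  unfold l2F
  refine PySem.List.sorted_eq_of_perm_of_pairwise_lt _ _ _ ?_ (pmList_pairwise cs)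
  rw [List.perm_ext_iff_of_nodup (pmList_nodup cs) (FF_nodup cs)]
  intro a
  rw [FF_mem, pmList_mem]

-- the index-pair view of A's final loop
lemma map_pair_zip (L : List (Int × Char)) :
    (PySem.List.pyRange 0 ((L.length : Int) - 1) 1).map
        (fun i => (PySem.List.pyGetD L i (0, ' '), PySem.List.pyGetD L (i + 1) (0, ' '))) =
      L.zip L.tail := by
  apply List.ext_getElem
  · simp only [List.length_map, PySem.List.length_pyRange_one, List.length_zip,
      List.length_tail]
    omega
  · intro n h1 h2
    have hn : n + 1 < L.length := by
      simp [PySem.List.length_pyRange_one] at h1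
      omega
    simp only [List.getElem_map, PySem.List.getElem_pyRange_one, List.getElem_zip,
      List.getElem_tail]
    have e1 : PySem.List.pyGetD L ((0 : Int) + (n : Int)) (0, ' ') = L[n]'(by omega) := by
      rw [zero_add, PySem.List.pyGetD_natCast, List.getD_eq_getElem _ _ (by omega)]
    have e2 : PySem.List.pyGetD L ((0 : Int) + (n : Int) + 1) (0, ' ') = L[n + 1]'hn := by
      rw [zero_add, show ((n : Int) + 1) = ((n + 1 : Nat) : Int) by push_cast; ring,
          PySem.List.pyGetD_natCast, List.getD_eq_getElem _ _ hn]
    rw [e1, e2]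

lemma loopA_eq_mg (L : List (Int × Char)) :
    (PySem.List.pyRange 0 ((L.length : Int) - 1) 1).foldl (fun x i =>
      if (PySem.List.pyGetD L (i + 1) (0, ' ')).1 - (PySem.List.pyGetD L i (0, ' ')).1 > x then
        (PySem.List.pyGetD L (i + 1) (0, ' ')).1 - (PySem.List.pyGetD L i (0, ' ')).1
      else x) 0 = mg (L.map Prod.fst) := by
  have hmg : mg (L.map Prod.fst) =
      (L.zip L.tail).foldl
        (fun x ab => if ab.2.1 - ab.1.1 > x then ab.2.1 - ab.1.1 else x) 0 := by
    unfold mg gaps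
    rw [← List.map_tail, List.zip_map, List.map_map, List.foldl_map]
    rfl
  rw [hmg, ← map_pair_zip L, List.foldl_map]

lemma gaps_append (l : List Int) (b : Int) :
    gaps (l ++ [b]) = gaps l ++ (match l.getLast? with | none => [] | some a => [b - a]) := by
  induction l with
  | nil => simp [gaps]
  | cons x xs ih =>
    cases xs with
    | nil => simp [gaps]
    | cons y t =>
      have h1 : gaps (x :: y :: t ++ [b]) = (y - x) :: gaps (y :: t ++ [b]) := rfl
      have h2 : gaps (x :: y :: t) = (y - x) :: gaps (y :: t) := rfl
      rw [List.cons_append, List.cons_append] at h1 ⊢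
      rw [h1, ← List.cons_append, ih, h2, List.getLast?_cons_cons, List.cons_append]

lemma mg_append (l : List Int) (b : Int) :
    mg (l ++ [b]) = match l.getLast? with
      | none => mg l
      | some a => if b - a > mg l then b - a else mg l := by
  unfold mg
  rw [gaps_append]
  cases h : l.getLast? with
  | none => simp
  | some a => simp [List.foldl_append]

-- B's loop invariant
lemma bfold (cs : List Char) (m : Nat) :
    (PySem.List.pyRange 0 (m : Int) 1).foldl
      (fun (st : Int × Option Int) p =>
        if PySem.List.pyGetD cs p ' ' = PySem.List.pyGetD cs (p + 1) ' ' then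
          ((match st.2 with
            | some prev => if p - prev > st.1 then p - prev else st.1
            | none => st.1), some p)
        else st) ((0 : Int), (none : Option Int)) =
    (mg (((List.range m).filter (fun p => cs.getD p ' ' == cs.getD (p + 1) ' ')).map (fun p : Nat => (p : Int))),
     ((((List.range m).filter (fun p => cs.getD p ' ' == cs.getD (p + 1) ' ')).map (fun p : Nat => (p : Int)))).getLast?) := by
  induction m with
  | zero =>
    rw [show ((0 : Nat) : Int) = 0 from rfl, PySem.List.pyRange_one_eq_nil (le_refl 0)]
    simp [mg, gaps]
  | succ m ih =>
    rw [show ((m + 1 : Nat) : Int) = (m : Int) + 1 by push_cast; ring,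
        PySem.List.pyRange_one_succ_right (by positivity), List.foldl_append, ih,
        List.range_succ, List.filter_append, List.map_append, List.foldl_cons, List.foldl_nil]
    have g1 : PySem.List.pyGetD cs ((m : Nat) : Int) ' ' = cs.getD m ' ' := by
      rw [PySem.List.pyGetD_natCast]
    have g2 : PySem.List.pyGetD cs (((m : Nat) : Int) + 1) ' ' = cs.getD (m + 1) ' ' := by
      rw [show (((m : Nat) : Int) + 1) = ((m + 1 : Nat) : Int) by push_cast; ring,
          PySem.List.pyGetD_natCast]
    by_cases hc : cs.getD m ' ' = cs.getD (m + 1) ' '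
    · rw [List.filter_singleton]
      simp only [g1, g2, hc, if_true, beq_self_eq_true, cond_true]
      rw [List.map_cons, List.map_nil]
      refine Prod.ext ?_ ?_
      · simp only
        rw [mg_append]
        cases (((List.range m).filter (fun p => cs.getD p ' ' == cs.getD (p + 1) ' ')).map
            (fun p : Nat => (p : Int))).getLast? <;> rfl
      · simp only
        rw [List.getLast?_concat]
    · rw [List.filter_singleton]
      have hcb : (cs.getD m ' ' == cs.getD (m + 1) ' ') = false := by
        simpa using hc
      simp only [g1, g2, hc, if_false, hcb, cond_false, List.map_nil, List.append_nil]

lemma portB_eq (s : String) :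
    lengthOfLongestSubstringFistmethod_alt s = mg ((dbl s.toList).map (fun p : Nat => (p : Int))) := by
  unfold lengthOfLongestSubstringFistmethod_alt dbl
  cases hn : s.toList.length with
  | zero =>
    rw [show PySem.Str.len s - 1 = -1 by rw [PySem.Str.len_eq, hn]; rfl,
        PySem.List.pyRange_one_eq_nil (by omega)]
    simp [hn, mg, gaps]
  | succ n =>
    rw [show PySem.Str.len s - 1 = ((n : Nat) : Int) by rw [PySem.Str.len_eq, hn]; push_cast; ring,
        bfold s.toList n]
    simp only [Nat.add_sub_cancel]

-- ===== VERDICT (by name: the statement is the Claim_ definition above) =====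
theorem lengthOfLongestSubstringFistmethod_spec : Claim_equal_lengthOfLongestSubstringFistmethod := by
  intro s _
  unfold Spec_lengthOfLongestSubstringFistmethod
  rw [portA_eq, portB_eq]
  have hl : PySem.List.len (l2F s.toList) = ((l2F s.toList).length : Int) := PySem.List.len_eq _
  rw [hl, loopA_eq_mg, l2F_eq]
  refine congrArg mg ?_
  unfold pmList
  rw [List.map_map]
  exact List.map_congr_left (fun p _ => rfl)
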